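-- pv_equiv track=rewrite | github.com/tylerobara/yattee-server | database/connection.py | _convert_qmark_to_pyformat
-- ===== SOURCE A (Python) =====
-- def _convert_qmark_to_pyformat(sql: str) -> str:
--     """Convert SQLite-style '?' placeholders to psycopg '%s'.
--
--     Existing repositories are written with qmark placeholders. For PostgreSQL,
--     translate only placeholders outside of quoted strings.
--     """
--     out = []
--     in_single = False
--     in_double = False
--     i = 0
--     while i < len(sql):
--         ch = sql[i]
--         if ch == "'" and not in_double:
--             # Handle escaped single quote '' inside string literals.
--             if in_single and i + 1 < len(sql) and sql[i + 1] == "'":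
--                 out.append("''")
--                 i += 2
--                 continue
--             in_single = not in_single
--             out.append(ch)
--         elif ch == '"' and not in_single:
--             in_double = not in_double
--             out.append(ch)
--         elif ch == "?" and not in_single and not in_double:
--             out.append("%s")
--         else:
--             out.append(ch)
--         i += 1
--     return "".join(out)
-- ===== SOURCE B (Python) =====
-- def _convert_qmark_to_pyformat(sql: str) -> str:
--     """Convert SQLite-style '?' placeholders to psycopg '%s'.
--
--     Tokenizer variant: instead of tracking quote state per character, consume
--     each quoted literal as a whole chunk (using str.find to jump to the
--     closing quote, honouring the '' escape), and rewrite only bare '?'.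
--     """
--     out = []
--     i = 0
--     n = len(sql)
--     while i < n:
--         c = sql[i]
--         if c == "'":
--             out.append(c)
--             i += 1
--             while i < n:
--                 j = sql.find("'", i)
--                 if j == -1:
--                     out.append(sql[i:])
--                     i = n
--                     break
--                 if j + 1 < n and sql[j + 1] == "'":
--                     out.append(sql[i:j + 2])
--                     i = j + 2
--                 else:
--                     out.append(sql[i:j + 1])
--                     i = j + 1
--                     break
--         elif c == '"':
--             j = sql.find('"', i + 1)
--             if j == -1:
--                 out.append(sql[i:])
--                 i = n
--             else:
--                 out.append(sql[i:j + 1])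
--                 i = j + 1
--         elif c == '?':
--             out.append('%s')
--             i += 1
--         else:
--             out.append(c)
--             i += 1
--     return ''.join(out)
-- ===== Notes on version B (the rewrite author's own statement) =====
-- stated objective: alternative
-- what changed: Replaced A's per-character scan with in_single/in_double state booleans by a tokenizer that consumes each quoted literal as one whole chunk (str.find jumps to the closing quote, honouring the doubled-quote escape) and rewrites only bare placeholders.
import Mathlib
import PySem

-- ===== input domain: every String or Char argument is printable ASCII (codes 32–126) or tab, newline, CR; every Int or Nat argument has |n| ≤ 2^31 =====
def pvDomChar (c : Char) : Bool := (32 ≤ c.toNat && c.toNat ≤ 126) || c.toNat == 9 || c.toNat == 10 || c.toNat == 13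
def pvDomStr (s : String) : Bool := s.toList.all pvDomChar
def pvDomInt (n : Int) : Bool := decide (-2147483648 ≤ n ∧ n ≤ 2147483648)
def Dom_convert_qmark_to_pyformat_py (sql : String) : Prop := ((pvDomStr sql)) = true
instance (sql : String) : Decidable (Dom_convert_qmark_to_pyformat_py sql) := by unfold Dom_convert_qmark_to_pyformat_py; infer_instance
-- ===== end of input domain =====

-- B replaces A's per-character quote-state booleans with a tokenizer that consumes each
-- quoted literal as a whole chunk; objective: alternative (same cost, different structure).


-- ===== PORT A =====
-- A's while loop over index i with the two state booleans, as structural recursion on the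
-- character list (the list tail plays the role of sql[i:]); branches in A's order.
def pvGoA : List Char → Bool → Bool → List Char
  | [], _, _ => []
  | c :: rest, in_single, in_double =>
    if c = '\'' ∧ in_double = false then
      -- "if in_single and i + 1 < len(sql) and sql[i+1] == \"'\"" : escaped '' inside literal
      match in_single, rest with
      | true, '\'' :: rest2 => '\'' :: '\'' :: pvGoA rest2 in_single in_double
      | _, r => c :: pvGoA r (!in_single) in_double
    else if c = '"' ∧ in_single = false then
      c :: pvGoA rest in_single (!in_double)
    else if c = '?' ∧ in_single = false ∧ in_double = false then
      '%' :: 's' :: pvGoA rest in_single in_double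
    else
      c :: pvGoA rest in_single in_double
termination_by l _ _ => l.length
decreasing_by all_goals simp

def convert_qmark_to_pyformat_py (sql : String) : String :=
  String.ofList (pvGoA sql.toList false false)

-- ===== PORT B =====
-- Source B's inner while over sql.find("'", i): consume the body of a single-quoted literal
-- (including the '' escape and the closing quote, if any), returning (chunk, remainder).
def pvTakeSingle : List Char → List Char × List Char
  | [] => ([], [])
  | '\'' :: '\'' :: rest => ('\'' :: '\'' :: (pvTakeSingle rest).1, (pvTakeSingle rest).2)
  | '\'' :: rest => (['\''], rest)
  | c :: rest => (c :: (pvTakeSingle rest).1, (pvTakeSingle rest).2)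

-- Source B's sql.find('"', i+1): consume up to and including the closing double quote, if any.
def pvTakeDouble : List Char → List Char × List Char
  | [] => ([], [])
  | '"' :: rest => (['"'], rest)
  | c :: rest => (c :: (pvTakeDouble rest).1, (pvTakeDouble rest).2)

theorem pvTakeSingle_snd_le (l : List Char) : (pvTakeSingle l).2.length ≤ l.length := by
  induction l using pvTakeSingle.induct <;> (simp_all [pvTakeSingle]; try omega)

theorem pvTakeDouble_snd_le (l : List Char) : (pvTakeDouble l).2.length ≤ l.length := by
  induction l using pvTakeDouble.induct <;> (simp_all [pvTakeDouble]; try omega)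

-- Source B's outer while loop: dispatch on the current character, jumping over whole literals.
def pvGoB : List Char → List Char
  | [] => []
  | '\'' :: rest => '\'' :: ((pvTakeSingle rest).1 ++ pvGoB (pvTakeSingle rest).2)
  | '"' :: rest => '"' :: ((pvTakeDouble rest).1 ++ pvGoB (pvTakeDouble rest).2)
  | '?' :: rest => '%' :: 's' :: pvGoB rest
  | c :: rest => c :: pvGoB rest
termination_by l => l.length
decreasing_by
  · exact Nat.lt_succ_of_le (pvTakeSingle_snd_le rest)
  · exact Nat.lt_succ_of_le (pvTakeDouble_snd_le rest)
  · simp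
  · simp

def convert_qmark_to_pyformat_py_alt (sql : String) : String :=
  String.ofList (pvGoB sql.toList)

-- ===== PRECONDITION & SPEC =====
def Spec_convert_qmark_to_pyformat_py (sql : String) (out : String) : Prop := out = convert_qmark_to_pyformat_py_alt sql
instance (sql : String) (out : String) : Decidable (Spec_convert_qmark_to_pyformat_py sql out) := by unfold Spec_convert_qmark_to_pyformat_py; infer_instance

-- ===== CLAIM (what is proved, stated in full; the proofs are below) =====
def Claim_equal_convert_qmark_to_pyformat_py : Prop := ∀ (sql : String), Dom_convert_qmark_to_pyformat_py sql → Spec_convert_qmark_to_pyformat_py sql (convert_qmark_to_pyformat_py sql)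

-- ===== LEMMAS AND PROOFS =====

-- One-step unfolding of A's loop body at a cons cell (pvGoA's own equations are split
-- by pattern overlap; this restates the body as written).
theorem pvGoA_cons (c : Char) (rest : List Char) (in_single in_double : Bool) :
    pvGoA (c :: rest) in_single in_double =
      if c = '\'' ∧ in_double = false then
        match in_single, rest with
        | true, '\'' :: rest2 => '\'' :: '\'' :: pvGoA rest2 in_single in_double
        | _, r => c :: pvGoA r (!in_single) in_double
      else if c = '"' ∧ in_single = false then
        c :: pvGoA rest in_single (!in_double)
      else if c = '?' ∧ in_single = false ∧ in_double = false then
        '%' :: 's' :: pvGoA rest in_single in_double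
      else
        c :: pvGoA rest in_single in_double := by
  rw [pvGoA.eq_def]

-- pvTakeSingle / pvTakeDouble pass over an ordinary character unchanged.
theorem pvTakeSingle_cons_ne (c : Char) (l : List Char) (hc : ¬ c = '\'') :
    pvTakeSingle (c :: l) = (c :: (pvTakeSingle l).1, (pvTakeSingle l).2) := by
  cases l with
  | nil => simp [pvTakeSingle]
  | cons a t => simp [pvTakeSingle, hc]

theorem pvTakeDouble_cons_ne (c : Char) (l : List Char) (hc : ¬ c = '"') :
    pvTakeDouble (c :: l) = (c :: (pvTakeDouble l).1, (pvTakeDouble l).2) := by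
  cases l <;> simp [pvTakeDouble]

-- In the in_single state, A emits exactly the chunk B's pvTakeSingle consumes, then
-- continues with both quote flags cleared.
theorem pvGoA_single (l : List Char) :
    pvGoA l true false = (pvTakeSingle l).1 ++ pvGoA (pvTakeSingle l).2 false false := by
  induction l using pvTakeSingle.induct with
  | case1 => simp [pvGoA, pvTakeSingle]
  | case2 rest ih => simp [pvGoA, pvTakeSingle, ih]
  | case3 rest h =>
    cases rest with
    | nil => simp [pvGoA, pvTakeSingle]
    | cons a t =>
      have ha : ¬ a = '\'' := fun hh => h t (by rw [hh])
      simp [pvGoA, pvTakeSingle, ha]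
  | case4 c rest h1 h2 ih =>
    have hc : ¬ c = '\'' := fun hh => h2 hh
    rw [pvTakeSingle_cons_ne c rest hc]
    rw [pvGoA_cons, if_neg (fun hh => hc hh.1)]
    rw [if_neg (fun hh => by simpa using hh.2), if_neg (fun hh => by simpa using hh.2.1)]
    rw [ih]
    simp

-- Same for the in_double state.
theorem pvGoA_double (l : List Char) :
    pvGoA l false true = (pvTakeDouble l).1 ++ pvGoA (pvTakeDouble l).2 false false := by
  induction l using pvTakeDouble.induct with
  | case1 => simp [pvGoA, pvTakeDouble]
  | case2 rest => simp [pvGoA, pvTakeDouble]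
  | case3 c rest h ih =>
    have hc : ¬ c = '"' := fun hh => h hh
    rw [pvTakeDouble_cons_ne c rest hc]
    rw [pvGoA_cons, if_neg (fun hh => by simpa using hh.2)]
    rw [if_neg (fun hh => hc hh.1), if_neg (fun hh => by simpa using hh.2.2)]
    rw [ih]
    simp

-- A from the neutral state computes exactly B's tokenizer output.
theorem pvGoA_eq_pvGoB (l : List Char) : pvGoA l false false = pvGoB l := by
  induction l using pvGoB.induct with
  | case1 => simp [pvGoA, pvGoB]
  | case2 rest ih =>
    rw [pvGoB, pvGoA_cons, if_pos (by simp : ('\'' : Char) = '\'' ∧ (false : Bool) = false)]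
    cases rest with
    | nil => simp [pvGoA_single, ih]
    | cons a t => simp [pvGoA_single, ih]
  | case3 rest ih =>
    rw [pvGoB, pvGoA_cons, if_neg (fun hh => by simpa using hh.1)]
    rw [if_pos (by simp : ('"' : Char) = '"' ∧ (false : Bool) = false)]
    simpa [pvGoA_double] using ih
  | case4 rest ih =>
    rw [pvGoB, pvGoA_cons, if_neg (fun hh => by simpa using hh.1), if_neg (fun hh => by simpa using hh.1)]
    rw [if_pos (by simp : ('?' : Char) = '?' ∧ (false : Bool) = false ∧ (false : Bool) = false)]
    simpa using ih
  | case5 c rest h1 h2 h3 ih =>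
    rw [pvGoB, pvGoA_cons, if_neg (fun hh => h1 hh.1), if_neg (fun hh => h2 hh.1), if_neg (fun hh => h3 hh.1)]
    · simpa using ih
    · exact h1
    · exact h2
    · exact h3

-- ===== VERDICT (by name: the statement is the Claim_ definition above) =====
theorem convert_qmark_to_pyformat_py_spec : Claim_equal_convert_qmark_to_pyformat_py := by
  intro sql _
  unfold Spec_convert_qmark_to_pyformat_py convert_qmark_to_pyformat_py convert_qmark_to_pyformat_py_alt
  rw [pvGoA_eq_pvGoB]
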